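-- pv_equiv track=rewrite | github.com/pangyouzhen/data-structure | base/python_math.py | increase_group
-- ===== SOURCE A (Python) =====
-- from typing import Tuple, List
--
-- def increase_group(num: int) -> List[List[int]]:
--     i = 0
--     res = []
--     tmp = []
--     group = 1
--     while i < num:
--         tmp.append(i)
--         #  这里改一下就是递乘分组了 group * n
--         if len(tmp) == group:
--             res.append(tmp)
--             tmp = []
--             group += 1
--         i += 1
--     return res
-- ===== SOURCE B (Python) =====
-- from typing import List
--
-- def increase_group(num: int) -> List[List[int]]:
--     res = []
--     s = 0
--     g = 1
--     while s + g <= num: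
--         res.append(list(range(s, s + g)))
--         s += g
--         g += 1
--     return res
-- ===== Notes on version B (the rewrite author's own statement) =====
-- stated objective: simpler
-- what changed: B iterates over group boundaries, emitting each complete chunk directly as range(s, s+g), instead of accumulating one element at a time into a temp buffer and flushing it when full.
import Mathlib
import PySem

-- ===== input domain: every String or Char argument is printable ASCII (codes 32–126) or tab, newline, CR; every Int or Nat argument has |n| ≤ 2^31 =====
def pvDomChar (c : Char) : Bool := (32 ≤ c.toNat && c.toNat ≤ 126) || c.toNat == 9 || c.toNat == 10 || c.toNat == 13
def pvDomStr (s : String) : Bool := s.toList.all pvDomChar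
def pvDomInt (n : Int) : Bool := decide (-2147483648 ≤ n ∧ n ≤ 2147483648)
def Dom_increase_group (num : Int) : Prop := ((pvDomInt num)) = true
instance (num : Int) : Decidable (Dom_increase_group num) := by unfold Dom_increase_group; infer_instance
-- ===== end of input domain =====

-- B emits each complete chunk directly from its boundaries (range(s, s+g)) instead of buffering one element at a time; objective: simpler.



-- ===== PORT A =====
-- A's while loop: i counts elements, tmp buffers the current group, res the finished groups.
def pvLoopA (num i : Int) (res : List (List Int)) (tmp : List Int) (group : Int) :
    List (List Int) :=
  if _h : i < num then
    let tmp' := tmp ++ [i]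
    if (tmp'.length : Int) = group then
      pvLoopA num (i + 1) (res ++ [tmp']) [] (group + 1)
    else
      pvLoopA num (i + 1) res tmp' group
  else
    res
termination_by (num - i).toNat
decreasing_by
  · omega
  · omega

def increase_group (num : Int) : List (List Int) :=
  pvLoopA num 0 [] [] 1

-- ===== PORT B =====
-- B's while loop over group boundaries; the group size is k+1 (k : Nat), start index s.
def pvLoopB (num s : Int) (k : Nat) (res : List (List Int)) : List (List Int) :=
  if _h : s + ((k : Int) + 1) ≤ num then
    pvLoopB num (s + ((k : Int) + 1)) (k + 1) (res ++ [PySem.List.pyRange s (s + ((k : Int) + 1)) 1])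
  else
    res
termination_by (num - s).toNat
decreasing_by omega

def increase_group_alt (num : Int) : List (List Int) :=
  pvLoopB num 0 0 []

-- ===== PRECONDITION & SPEC =====
def Spec_increase_group (num : Int) (out : List (List Int)) : Prop := out = increase_group_alt num
instance (num : Int) (out : List (List Int)) : Decidable (Spec_increase_group num out) := by unfold Spec_increase_group; infer_instance

-- ===== CLAIM (what is proved, stated in full; the proofs are below) =====
def Claim_equal_increase_group : Prop := ∀ (num : Int), Dom_increase_group num → Spec_increase_group num (increase_group num)

-- ===== LEMMAS AND PROOFS =====

-- the segment [s, s+1, …, s+n-1]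
def pvSeg (s : Int) (n : Nat) : List Int := (List.range n).map (fun j : Nat => s + (j : Int))

theorem pvSeg_succ (s : Int) (n : Nat) : pvSeg s (n + 1) = pvSeg s n ++ [s + n] := by
  simp [pvSeg, List.range_succ]

theorem pvSeg_eq_pyRange (s : Int) (n : Nat) :
    pvSeg s n = PySem.List.pyRange s (s + n) 1 := by
  rw [PySem.List.pyRange_one]
  simp only [add_sub_cancel_left, Int.toNat_natCast, pvSeg]

-- If tmp can never fill up to group before i reaches num, A's loop returns res unchanged.
theorem pvLoopA_drain (num : Int) : ∀ (i : Int) (res : List (List Int)) (tmp : List Int)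
    (group : Int), (tmp.length : Int) + (num - i) < group →
    pvLoopA num i res tmp group = res := by
  intro i res tmp group h
  rw [pvLoopA]
  split
  · rename_i hi
    have hne : ((tmp ++ [i]).length : Int) ≠ group := by simp; omega
    rw [if_neg hne]
    exact pvLoopA_drain num (i + 1) res (tmp ++ [i]) group (by simp; omega)
  · rfl
termination_by i => (num - i).toNat
decreasing_by omega

-- Filling one group: starting with j elements already buffered, A's loop finishes the group.
theorem pvLoopA_fill (num s : Int) (k : Nat) : ∀ (j : Nat) (res : List (List Int)),
    j ≤ k → s + ((k : Int) + 1) ≤ num →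
    pvLoopA num (s + j) res (pvSeg s j) ((k : Int) + 1) =
      pvLoopA num (s + ((k : Int) + 1)) (res ++ [pvSeg s (k + 1)]) [] ((k : Int) + 2) := by
  intro j res hj hnum
  have hi : s + (j : Int) < num := by omega
  rw [pvLoopA]
  simp only [dif_pos hi]
  have htmp : pvSeg s j ++ [s + (j : Int)] = pvSeg s (j + 1) := (pvSeg_succ s j).symm
  rw [htmp]
  have hlen : ((pvSeg s (j + 1)).length : Int) = (j : Int) + 1 := by simp [pvSeg]
  by_cases hjk : j = k
  · subst hjk
    rw [if_pos hlen]
    have h1 : s + (j : Int) + 1 = s + ((j : Int) + 1) := by ring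
    have h2 : (j : Int) + 1 + 1 = (j : Int) + 2 := by ring
    rw [h1, h2]
  · have hne : ((pvSeg s (j + 1)).length : Int) ≠ (k : Int) + 1 := by
      rw [hlen]; omega
    rw [if_neg hne]
    have h1 : s + (j : Int) + 1 = s + ((j + 1 : Nat) : Int) := by push_cast; ring
    rw [h1]
    exact pvLoopA_fill num s k (j + 1) res (by omega) hnum

-- Main loop correspondence at group boundaries.
theorem pvLoop_eq (num : Int) : ∀ (s : Int) (k : Nat) (res : List (List Int)),
    pvLoopA num s res [] ((k : Int) + 1) = pvLoopB num s k res := by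
  intro s k res
  rw [pvLoopB]
  split
  · rename_i hle
    have hfill := pvLoopA_fill num s k 0 res (Nat.zero_le k) hle
    have hseg0 : pvSeg s 0 = [] := by simp [pvSeg]
    rw [hseg0] at hfill
    simp only [Nat.cast_zero, add_zero] at hfill
    rw [hfill]
    have h2 : ((k : Int)) + 2 = ((k + 1 : Nat) : Int) + 1 := by push_cast; ring
    rw [h2, pvLoop_eq num (s + ((k : Int) + 1)) (k + 1) (res ++ [pvSeg s (k + 1)])]
    rw [pvSeg_eq_pyRange]
    norm_num
  · rename_i hgt
    exact pvLoopA_drain num s res [] ((k : Int) + 1) (by simp; omega)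
termination_by s => (num - s).toNat
decreasing_by omega

-- ===== VERDICT (by name: the statement is the Claim_ definition above) =====
theorem increase_group_spec : Claim_equal_increase_group := by
  intro num _
  unfold Spec_increase_group increase_group increase_group_alt
  have := pvLoop_eq num 0 0 []
  simpa using this
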